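-- pv_equiv track=rewrite | github.com/SherzodOtajonov/cp-stuff | practice/Social_Distance.py | solve
-- ===== SOURCE A (Python) =====
-- def solve(n, k, s):
--     if set(s) == set('0') and n==k: return 1
--     res = curr = 0
--     for i in range(n):
--         if s[i] == '0' and i == n-1:
--             curr += 1
--         if s[i] != '0' or i == n-1:
--             res += curr//(k+1)
--             curr = 0
--         else: curr += 1
--     return res
-- ===== SOURCE B (Python) =====
-- def solve(n, k, s):
--     if set(s) == set('0') and n == k:
--         return 1
--     t = s[:max(n, 0)]
--     if k + 1 > len(t):
--         return 0
--     return t.count('0' * (k + 1))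
-- ===== Notes on version B (the rewrite author's own statement) =====
-- stated objective: faster
-- what changed: A's indexed per-character pass with curr/res bookkeeping and a last-index special case is replaced by a single closed-form call: the answer is the number of non-overlapping occurrences of the pattern '0'*(k+1) in s[:n] (str.count), since Python's greedy left-to-right count places exactly len(run)//(k+1) matches inside each maximal zero run; the all-zeros guard is kept verbatim.
-- outside the precondition, e.g. on solve(3, -2, '000'): A returns -3, B returns 4; on solve(0, -1, 'x'): A returns 0, B returns 1
import Mathlib
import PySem

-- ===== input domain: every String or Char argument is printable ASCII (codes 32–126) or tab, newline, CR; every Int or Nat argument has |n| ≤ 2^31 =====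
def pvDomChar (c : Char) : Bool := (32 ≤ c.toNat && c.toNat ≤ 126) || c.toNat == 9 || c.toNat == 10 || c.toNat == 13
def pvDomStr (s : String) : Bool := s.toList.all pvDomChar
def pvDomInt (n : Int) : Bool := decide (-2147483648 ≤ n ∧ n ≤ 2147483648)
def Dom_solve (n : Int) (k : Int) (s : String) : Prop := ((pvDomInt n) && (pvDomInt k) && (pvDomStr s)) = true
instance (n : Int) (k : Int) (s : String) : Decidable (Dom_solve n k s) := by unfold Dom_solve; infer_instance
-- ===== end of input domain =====

-- B replaces A's indexed per-character pass (curr/res bookkeeping, last-index special case) by a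
-- closed form: the answer is the number of non-overlapping occurrences of '0'*(k+1) in s[:n]
-- (str.count); the all-zeros guard is kept verbatim. Objective: faster (measured by the timing
-- run; same O(n), the scan moves into C-level str.count).

-- ===== PORT A =====
-- loop body of A's `for i in range(n)` (named helper; same state (res, curr))
def solveStep (n : Int) (k : Int) (L : List Char) (st : Int × Int) (i : Int) : Int × Int :=
  -- s[i]: total lookup form; Pre_solve keeps i in range
  let c := PySem.List.pyGetD L i ' '
  let curr := if c == '0' && i == n - 1 then st.2 + 1 else st.2
  if c != '0' || i == n - 1 then (st.1 + PySem.Int.floordiv curr (k + 1), 0)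
  else (st.1, curr + 1)

def solve (n : Int) (k : Int) (s : String) : Int :=
  if PySem.Set.equal (PySem.Set.ofList s.toList) (PySem.Set.ofList ['0']) && (n == k) then 1
  else ((PySem.List.pyRange 0 n 1).foldl (solveStep n k s.toList) ((0 : Int), (0 : Int))).1

-- ===== PORT B =====
def solve_alt (n : Int) (k : Int) (s : String) : Int :=
  if PySem.Set.equal (PySem.Set.ofList s.toList) (PySem.Set.ofList ['0']) && (n == k) then 1
  else
    -- t = s[:max(n, 0)]
    let t := (PySem.Str.slice s none (some (max n 0))).toList
    -- if k + 1 > len(t): return 0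
    if k + 1 > (t.length : Int) then 0
    -- return t.count('0' * (k + 1))
    else (PySem.Chars.count t (PySem.List.pyRepeat ['0'] (k + 1)) : Int)

-- ===== PRECONDITION & SPEC =====
-- Pre_ excludes n > len(s), where A raises IndexError on s[i], and negative k — outside the
-- natural domain (k is a required gap between placed people) — where A raises ZeroDivisionError
-- (k = -1, n ≥ 1) or returns negative floor-division artefacts; the second disjunct keeps the
-- all-zeros n == k inputs, on which both programs return 1 via the verbatim guard.
def Pre_solve (n : Int) (k : Int) (s : String) : Prop :=
  (0 ≤ k ∧ n ≤ PySem.Str.len s) ∨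
  (s.toList ≠ [] ∧ (∀ c ∈ s.toList, c = '0') ∧ n = k)
instance (n : Int) (k : Int) (s : String) : Decidable (Pre_solve n k s) := by
  unfold Pre_solve; infer_instance

def pvWitness_solve : Int × Int × String := (5, 1, "10001")

def Spec_solve (n : Int) (k : Int) (s : String) (out : Int) : Prop := out = solve_alt n k s
instance (n : Int) (k : Int) (s : String) (out : Int) : Decidable (Spec_solve n k s out) := by
  unfold Spec_solve; infer_instance

-- ===== CLAIM (what is proved, stated in full; the proofs are below) =====
def Claim_equal_solve : Prop := ∀ (n : Int) (k : Int) (s : String),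
  Dom_solve n k s → Pre_solve n k s → Spec_solve n k s (solve n k s)

-- ===== LEMMAS AND PROOFS =====

-- common specification: qspec k curr t = seats placed in t, with curr pending zeros before t,
-- flushing the pending run with //(k+1) at each non-'0' char and once at the end.
def qspec (k : Int) (curr : Int) : List Char → Int
  | [] => PySem.Int.floordiv curr (k + 1)
  | c :: cs => if c = '0' then qspec k (curr + 1) cs
               else PySem.Int.floordiv curr (k + 1) + qspec k 0 cs

-- A's loop body away from the last index, as a structural pass
def hmid (k : Int) (st : Int × Int) : List Char → Int × Int
  | [] => st
  | c :: cs => if c = '0' then hmid k (st.1, st.2 + 1) cs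
               else hmid k (st.1 + PySem.Int.floordiv st.2 (k + 1), 0) cs

theorem floordiv_zero_left (d : Int) : PySem.Int.floordiv 0 d = 0 := by
  simp [PySem.Int.floordiv]

-- A's fold over range(a, b) with b ≤ n-1 is the structural pass hmid over the chars a..b-1
theorem rangeFold (k n : Int) (L : List Char) (b : Nat) (hbL : b ≤ L.length)
    (hbn : (b : Int) ≤ n - 1) :
    ∀ (m a : Nat), a + m = b → ∀ st : Int × Int,
      (PySem.List.pyRange (a : Int) (b : Int) 1).foldl (solveStep n k L) st
        = hmid k st ((L.drop a).take m) := by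
  intro m
  induction m with
  | zero =>
    intro a ha st
    subst ha
    rw [PySem.List.pyRange_one_eq_nil (by simp)]
    simp [hmid]
  | succ m ih =>
    intro a ha st
    have haltb : (a : Int) < (b : Int) := by exact_mod_cast Nat.lt_of_lt_of_le (Nat.lt_of_lt_of_le (Nat.lt_succ_self a) (by omega)) (le_refl b)
    have haL : a < L.length := by omega
    rw [PySem.List.pyRange_one_cons haltb, List.foldl_cons]
    have hne : ((a : Int) == n - 1) = false := by
      simp only [beq_eq_false_iff_ne, ne_eq]
      omega
    have hstep : solveStep n k L st (a : Int)
        = if L[a] = '0' then (st.1, st.2 + 1)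
          else (st.1 + PySem.Int.floordiv st.2 (k + 1), 0) := by
      simp only [solveStep, PySem.List.pyGetD_natCast, List.getD_eq_getElem L ' ' haL, hne,
        Bool.and_false, Bool.or_false]
      by_cases hc : L[a] = '0' <;> simp [hc]
    have hdrop : L.drop a = L[a] :: L.drop (a + 1) := List.drop_eq_getElem_cons haL
    rw [hdrop, List.take_succ_cons]
    have hcast : ((a : Int)) + 1 = ((a + 1 : Nat) : Int) := by push_cast; ring
    by_cases hc : L[a] = '0'
    · simp only [hstep, hc, hmid, hcast]
      exact ih (a + 1) (by omega) _
    · simp only [hstep, hmid, if_neg hc, hcast]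
      exact ih (a + 1) (by omega) _

-- bridge: A's final-index flush on top of hmid is qspec of the run with the last char appended
theorem hmid_finish (k : Int) :
    ∀ (u : List Char) (res curr : Int) (c : Char),
      (hmid k (res, curr) u).1
        + PySem.Int.floordiv
            (if c = '0' then (hmid k (res, curr) u).2 + 1 else (hmid k (res, curr) u).2) (k + 1)
        = res + qspec k curr (u ++ [c]) := by
  intro u
  induction u with
  | nil =>
    intro res curr c
    by_cases hc : c = '0' <;>
      simp [hmid, qspec, hc, floordiv_zero_left]
  | cons d u ih =>
    intro res curr c
    by_cases hd : d = '0'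
    · simp only [hmid, List.cons_append, qspec, hd]
      exact ih res (curr + 1) c
    · simp only [hmid, List.cons_append, qspec, if_neg hd]
      rw [ih (res + PySem.Int.floordiv curr (k + 1)) 0 c]
      ring

-- A's whole else-branch computes qspec over the first N characters
theorem solveA_eq (k : Int) (L : List Char) (N : Nat) (hN : N ≤ L.length) :
    ((PySem.List.pyRange 0 (N : Int) 1).foldl (solveStep (N : Int) k L) ((0 : Int), (0 : Int))).1
      = qspec k 0 (L.take N) := by
  cases N with
  | zero =>
    rw [PySem.List.pyRange_one_eq_nil (by simp)]
    simp [qspec, floordiv_zero_left]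
  | succ m =>
    have hmL : m < L.length := by omega
    have hc1 : ((m + 1 : Nat) : Int) = (m : Int) + 1 := by push_cast; ring
    rw [hc1]
    rw [PySem.List.pyRange_one_append 0 (m : Int) ((m : Int) + 1) (by positivity) (by omega)]
    rw [PySem.List.pyRange_one_singleton]
    rw [List.foldl_append, List.foldl_cons, List.foldl_nil]
    have hfold := rangeFold k ((m : Int) + 1) L m (by omega) (by omega) m 0 (by omega)
      ((0 : Int), (0 : Int))
    rw [show ((0 : Nat) : Int) = (0 : Int) by simp] at hfold
    rw [hfold]
    simp only [List.drop_zero]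
    have hlast : ((m : Int) == (m : Int) + 1 - 1) = true := by simp
    set p := hmid k ((0 : Int), (0 : Int)) (L.take m) with hp
    have hstep : solveStep ((m : Int) + 1) k L p (m : Int)
        = (p.1 + PySem.Int.floordiv (if L[m] = '0' then p.2 + 1 else p.2) (k + 1), 0) := by
      simp only [solveStep, PySem.List.pyGetD_natCast, List.getD_eq_getElem L ' ' hmL, hlast,
        Bool.and_true, Bool.or_true, if_true]
      by_cases hc : L[m] = '0' <;> simp [hc]
    rw [hstep]
    have := hmid_finish k (L.take m) 0 0 L[m]
    rw [← hp] at this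
    simp only [zero_add] at this
    rw [this]
    rw [← List.take_concat_get hmL, List.concat_eq_append]

-- B side: the greedy count, restated as a Nat-valued run pass (cur = pending zeros)
def nq (d : Nat) : List Char → Nat → Nat
  | [], cur => cur / d
  | c :: cs, cur => if c = '0' then nq d cs (cur + 1) else cur / d + nq d cs 0

theorem nq_small (d : Nat) : ∀ (t : List Char) (cur : Nat), cur + t.length < d → nq d t cur = 0 := by
  intro t
  induction t with
  | nil =>
    intro cur h
    simp only [nq]
    exact Nat.div_eq_of_lt (by simpa using h)
  | cons c cs ih =>
    intro cur h
    simp only [nq, List.length_cons] at *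
    by_cases hc : c = '0'
    · rw [if_pos hc]; exact ih (cur + 1) (by omega)
    · rw [if_neg hc, Nat.div_eq_of_lt (by omega), ih 0 (by omega)]

-- a full pending block of d zeros is one more seat
theorem nq_add (d : Nat) (hd : 1 ≤ d) :
    ∀ (t : List Char) (cur : Nat), nq d t (cur + d) = 1 + nq d t cur := by
  intro t
  induction t with
  | nil =>
    intro cur
    simp only [nq]
    rw [Nat.add_div_right cur hd]
    omega
  | cons c cs ih =>
    intro cur
    by_cases hc : c = '0'
    · simp only [nq, if_pos hc]
      have : cur + d + 1 = (cur + 1) + d := by omega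
      rw [this, ih (cur + 1)]
    · simp only [nq, if_neg hc]
      rw [Nat.add_div_right cur hd]
      omega

-- pending zeros may be prepended to the list instead
theorem nq_rep (d : Nat) :
    ∀ (m : Nat) (u : List Char) (cur : Nat),
      nq d (List.replicate m '0' ++ u) cur = nq d u (cur + m) := by
  intro m
  induction m with
  | zero => intro u cur; simp
  | succ m ih =>
    intro u cur
    rw [List.replicate_succ, List.cons_append]
    simp only [nq, if_true]
    rw [ih u (cur + 1)]
    congr 1
    omega

-- the leading-zero block of t is a replicate
theorem takeWhile_zero_replicate (t : List Char) :
    t.takeWhile (· == '0') = List.replicate (t.takeWhile (· == '0')).length '0' := by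
  apply List.eq_replicate_of_mem
  intro b hb
  have := List.mem_takeWhile_imp hb
  simpa using this

-- the char after the leading-zero block is not '0'
theorem dropWhile_zero_head (t : List Char) (c : Char) (cs : List Char)
    (h : t.dropWhile (· == '0') = c :: cs) : c ≠ '0' := by
  intro hc
  have hne : t.dropWhile (· == '0') ≠ [] := by simp [h]
  have hhead := List.head_dropWhile_not (fun x => x == '0') hne
  have hh : (t.dropWhile (· == '0')).head hne = c := by
    simp [h]
  rw [hh, hc] at hhead
  simp at hhead

-- Python's greedy non-overlapping count of '0'*d equals the run pass nq
theorem count_go_eq (d : Nat) (hd : 1 ≤ d) :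
    ∀ (fuel : Nat) (t : List Char), t.length ≤ fuel → ∀ (acc : Nat),
      PySem.Chars.count.go (List.replicate d '0') fuel t acc = acc + nq d t 0 := by
  intro fuel
  induction fuel with
  | zero =>
    intro t ht acc
    have : t = [] := by
      cases t with
      | nil => rfl
      | cons c cs => simp at ht
    subst this
    rw [PySem.Chars.count.go]
    simp [nq, Nat.div_eq_of_lt hd]
  | succ f ih =>
    intro t ht acc
    cases t with
    | nil =>
      rw [PySem.Chars.count.go]
      · simp [nq, Nat.div_eq_of_lt hd]
      · omega
    | cons c cs =>
      rw [PySem.Chars.count.go]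
      by_cases hp : (List.replicate d '0').isPrefixOf (c :: cs)
      · rw [if_pos hp]
        have hpre : List.replicate d '0' <+: c :: cs := List.isPrefixOf_iff_prefix.mp hp
        obtain ⟨u, hu⟩ := hpre
        have hlen : d ≤ (c :: cs).length := by
          rw [← hu]; simp
        have hdrop : List.drop (List.replicate d '0').length (c :: cs) = u := by
          rw [← hu, List.drop_append_of_le_length (by simp), List.drop_replicate]
          simp
        rw [hdrop]
        have hulen : u.length ≤ f := by
          have : (c :: cs).length = d + u.length := by rw [← hu]; simp
          simp only [List.length_cons] at this ht
          omega
        rw [ih u hulen (acc + 1)]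
        have hnq : nq d (c :: cs) 0 = 1 + nq d u 0 := by
          rw [← hu, nq_rep d d u 0]
          have h0d := nq_add d hd u 0
          rw [Nat.zero_add] at h0d ⊢
          exact h0d
        rw [hnq]
        omega
      · rw [if_neg hp]
        have hcs : cs.length ≤ f := by simp only [List.length_cons] at ht; omega
        rw [ih cs hcs acc]
        congr 1
        by_cases hc : c = '0'
        · -- leading zeros fewer than d: dropping one char does not change the count
          subst hc
          have hsplit := List.takeWhile_append_dropWhile (p := (· == '0')) (l := '0' :: cs)
          set L := (('0' :: cs).takeWhile (· == '0')).length with hL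
          have htw : ('0' :: cs).takeWhile (· == '0') = List.replicate L '0' :=
            takeWhile_zero_replicate _
          have hL1 : 1 ≤ L := by
            rw [hL]
            simp [List.takeWhile]
          have hLd : L < d := by
            by_contra hge
            replace hge : d ≤ L := Nat.le_of_not_lt hge
            apply hp
            apply List.isPrefixOf_iff_prefix.mpr
            refine ⟨List.replicate (L - d) '0' ++ ('0' :: cs).dropWhile (· == '0'), ?_⟩
            rw [← List.append_assoc, ← List.replicate_add,
              show d + (L - d) = L from by omega, ← htw]
            exact hsplit
          set rest := ('0' :: cs).dropWhile (· == '0') with hrest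
          have hteq : '0' :: cs = List.replicate L '0' ++ rest := by
            rw [← htw, hsplit]
          have hrepL : List.replicate L '0' = '0' :: List.replicate (L - 1) '0' := by
            rw [← List.replicate_succ, show L - 1 + 1 = L from by omega]
          have hcseq : cs = List.replicate (L - 1) '0' ++ rest := by
            have h2 : '0' :: cs = '0' :: (List.replicate (L - 1) '0' ++ rest) := by
              rw [hteq, hrepL, List.cons_append]
            exact (List.cons.injEq _ _ _ _ ▸ h2).2
          have h1 : nq d ('0' :: cs) 0 = nq d rest L := by
            rw [hteq, nq_rep, Nat.zero_add]
          have h2 : nq d cs 0 = nq d rest (L - 1) := by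
            rw [hcseq, nq_rep, Nat.zero_add]
          rw [h1, h2]
          have hdiv : (L - 1) / d = L / d := by
            rw [Nat.div_eq_of_lt hLd, Nat.div_eq_of_lt (by omega)]
          cases hr : rest with
          | nil => simp only [nq, hdiv]
          | cons r rs =>
            have hrne : r ≠ '0' := dropWhile_zero_head _ r rs (by rw [← hrest, hr])
            simp only [nq, if_neg hrne, hdiv]
        · simp [nq, hc, Nat.div_eq_of_lt hd]

theorem floordiv_natCast_pos (c : Nat) (k : Int) (hk : 0 ≤ k) :
    PySem.Int.floordiv (c : Int) (k + 1) = ((c / (k + 1).toNat : Nat) : Int) := by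
  unfold PySem.Int.floordiv
  have h1 : k + 1 = (((k + 1).toNat : Nat) : Int) := by omega
  rw [h1, ← Int.ofNat_fdiv]
  simp

theorem qspec_eq_nq (k : Int) (hk : 0 ≤ k) :
    ∀ (t : List Char) (cur : Nat), qspec k (cur : Int) t = (nq (k + 1).toNat t cur : Int) := by
  intro t
  induction t with
  | nil =>
    intro cur
    simp only [qspec, nq]
    exact floordiv_natCast_pos cur k hk
  | cons c cs ih =>
    intro cur
    by_cases hc : c = '0'
    · simp only [qspec, nq, if_pos hc]
      rw [show (cur : Int) + 1 = ((cur + 1 : Nat) : Int) by push_cast; ring]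
      exact ih (cur + 1)
    · simp only [qspec, nq, if_neg hc]
      rw [floordiv_natCast_pos cur k hk, show (0 : Int) = ((0 : Nat) : Int) by simp, ih 0]
      push_cast
      ring

-- the all-zeros guard fires on the second disjunct of Pre_solve
theorem guardFires (n k : Int) (l : List Char) (hne : l ≠ []) (h0 : ∀ c ∈ l, c = '0')
    (hnk : n = k) :
    (PySem.Set.equal (PySem.Set.ofList l) (PySem.Set.ofList ['0']) && (n == k)) = true := by
  rw [Bool.and_eq_true, beq_iff_eq]
  refine ⟨(PySem.Set.equal_iff _ _).mpr ?_, hnk⟩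
  intro x
  rw [PySem.Set.mem_ofList, PySem.Set.mem_ofList]
  constructor
  · intro hx; simp [h0 x hx]
  · intro hx
    obtain ⟨c, hc⟩ := List.exists_mem_of_ne_nil l hne
    simp only [List.mem_singleton] at hx
    rw [hx, ← h0 c hc]
    exact hc

-- ===== VERDICT (by name: the statement is the Claim_ definition above) =====
theorem solve_spec : Claim_equal_solve := by
  intro n k s _hdom hpre
  unfold Spec_solve solve solve_alt
  by_cases hg : (PySem.Set.equal (PySem.Set.ofList s.toList) (PySem.Set.ofList ['0']) && (n == k)) = true
  · rw [if_pos hg, if_pos hg]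
  · have hp : 0 ≤ k ∧ n ≤ PySem.Str.len s := by
      rcases hpre with h | ⟨h1, h2, h3⟩
      · exact h
      · exact absurd (guardFires n k s.toList h1 h2 h3) hg
    obtain ⟨hk, hnlen⟩ := hp
    rw [if_neg hg, if_neg hg]
    have hmax0 : (0 : Int) ≤ max n 0 := le_max_right n 0
    have hslice : (PySem.Str.slice s none (some (max n 0))).toList
        = s.toList.take (max n 0).toNat := by
      rw [PySem.Str.toList_slice, PySem.Chars.slice_eq_listSlice,
        PySem.List.slice_to s.toList hmax0]
    rw [hslice]
    set d : Nat := (k + 1).toNat with hdd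
    have hd1 : 1 ≤ d := by omega
    have hrepeq : PySem.List.pyRepeat ['0'] (k + 1) = List.replicate d '0' := by
      rw [PySem.List.pyRepeat_singleton]
    by_cases hn0 : 0 ≤ n
    · have hN : n = ((n.toNat : Nat) : Int) := (Int.toNat_of_nonneg hn0).symm
      have hlen : n.toNat ≤ s.toList.length := by
        rw [PySem.Str.len_eq] at hnlen; omega
      have hm : (max n 0).toNat = n.toNat := by omega
      rw [hm]
      set t : List Char := s.toList.take n.toNat with htt
      have hA : ((PySem.List.pyRange 0 n 1).foldl (solveStep n k s.toList) ((0 : Int), (0 : Int))).1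
          = qspec k 0 t := by
        rw [hN]
        exact solveA_eq k s.toList n.toNat hlen
      rw [hA]
      have hq : qspec k 0 t = (nq d t 0 : Int) := by
        have := qspec_eq_nq k hk t 0
        simpa using this
      rw [hq]
      by_cases hbig : k + 1 > (t.length : Int)
      · rw [if_pos hbig]
        have hsm : 0 + t.length < d := by
          have hb2 : (t.length : Int) < k + 1 := hbig
          omega
        rw [nq_small d t 0 hsm]
        simp
      · rw [if_neg hbig]
        rw [hrepeq]
        have hsubne : (List.replicate d '0').isEmpty = false := by
          simp
          omega
        unfold PySem.Chars.count
        rw [hsubne]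
        simp only [Bool.false_eq_true, if_false]
        rw [count_go_eq d hd1 t.length t (le_refl _) 0]
        simp
    · -- n < 0: A's range is empty, B's slice is empty and the length guard fires
      rw [PySem.List.pyRange_one_eq_nil (by omega), List.foldl_nil]
      have hm : (max n 0).toNat = 0 := by omega
      rw [hm, List.take_zero]
      rw [if_pos (by simp; omega)]
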